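-- pv_equiv track=rewrite | github.com/PawelReich/KicadToPNG | src/kicadtopng.py | remove_textboxes_raw
-- ===== SOURCE A (Python) =====
-- def remove_textboxes_raw(content):
--     out = []
--     i = 0
--     n = len(content)
--     while i < n:
--         if content[i:].startswith('(text_box'):
--             balance = 1
--             j = i + 1
--             in_string = False
--             escape = False
--             while j < n and balance > 0:
--                 char = content[j]
--                 if in_string:
--                     if escape: escape = False
--                     elif char == '\\': escape = True
--                     elif char == '"': in_string = False
--                 else:
--                     if char == '"': in_string = True
--                     elif char == '(': balance += 1
--                     elif char == ')': balance -= 1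
--                 j += 1
--             i = j
--         else:
--             out.append(content[i])
--             i += 1
--     return "".join(out)
-- ===== SOURCE B (Python) =====
-- def remove_textboxes_raw(content):
--     parts = []
--     n = len(content)
--     i = 0
--     while True:
--         k = content.find('(text_box', i)
--         if k == -1:
--             parts.append(content[i:])
--             return "".join(parts)
--         parts.append(content[i:k])
--         j = k + 1
--         balance = 1
--         mode = 0  # 0 = normal, 1 = inside string, 2 = just saw backslash in string
--         while j < n and balance > 0:
--             c = content[j]
--             if mode == 2:
--                 mode = 1
--             elif mode == 1:
--                 if c == '\\':
--                     mode = 2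
--                 elif c == '"':
--                     mode = 0
--             else:
--                 if c == '"':
--                     mode = 1
--                 elif c == '(':
--                     balance += 1
--                 elif c == ')':
--                     balance -= 1
--             j += 1
--         i = j
-- ===== Notes on version B (the rewrite author's own statement) =====
-- stated objective: faster
-- what changed: B replaces A's per-index startswith test on a full slice of the remaining string (which copies the tail at every position) with str.find chunk copying between matches, and replaces the two boolean string-state flags of the skip loop with a single integer mode state machine.
import Mathlib
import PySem

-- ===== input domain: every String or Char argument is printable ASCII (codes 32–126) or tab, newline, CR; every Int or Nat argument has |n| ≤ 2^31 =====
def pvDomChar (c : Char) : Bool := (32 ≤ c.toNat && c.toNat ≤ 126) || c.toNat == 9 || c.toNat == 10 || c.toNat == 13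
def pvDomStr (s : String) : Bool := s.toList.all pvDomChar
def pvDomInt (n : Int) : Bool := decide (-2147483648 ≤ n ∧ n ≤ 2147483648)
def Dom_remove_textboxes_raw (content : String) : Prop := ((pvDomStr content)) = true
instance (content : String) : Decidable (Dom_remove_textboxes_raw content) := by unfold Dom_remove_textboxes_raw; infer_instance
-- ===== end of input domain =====

-- B replaces A's per-index slice+startswith scan by str.find chunk copying and an
-- integer-mode state machine for the string-aware balance skip (objective: faster).

-- ===== PORT A =====
-- A's inner while loop: consumes chars while j < n and balance > 0, returns the remaining suffix
def pvSkipA (l : List Char) (balance : Int) (in_string escape : Bool) : List Char :=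
  if balance ≤ 0 then l
  else match l with
    | [] => []
    | c :: rest =>
      if in_string then
        if escape then pvSkipA rest balance in_string false
        else if c = '\\' then pvSkipA rest balance in_string true
        else if c = '"' then pvSkipA rest balance false escape
        else pvSkipA rest balance in_string escape
      else
        if c = '"' then pvSkipA rest balance true escape
        else if c = '(' then pvSkipA rest (balance + 1) in_string escape
        else if c = ')' then pvSkipA rest (balance - 1) in_string escape
        else pvSkipA rest balance in_string escape

-- termination helper for the outer loop (the skip never grows the suffix)
theorem pvSkipA_length_le (l : List Char) (b : Int) (s e : Bool) :
    (pvSkipA l b s e).length ≤ l.length := by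
  fun_induction pvSkipA l b s e <;> simp_all <;> omega

-- A's outer while loop over the suffix of content at index i
def pvLoopA (l : List Char) : List Char :=
  match l with
  | [] => []
  | c :: rest =>
    if ("(text_box".toList).isPrefixOf (c :: rest) then
      pvLoopA (pvSkipA rest 1 false false)
    else c :: pvLoopA rest
termination_by l.length
decreasing_by
  · exact Nat.lt_succ_of_le (pvSkipA_length_le rest 1 false false)
  · simp

def remove_textboxes_raw (content : String) : String :=
  String.ofList (pvLoopA content.toList)

-- ===== PORT B =====
-- B's inner while loop, with the single integer mode variable
def pvSkipB (l : List Char) (balance : Int) (mode : Nat) : List Char :=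
  if balance ≤ 0 then l
  else match l with
    | [] => []
    | c :: rest =>
      if mode = 2 then pvSkipB rest balance 1
      else if mode = 1 then
        if c = '\\' then pvSkipB rest balance 2
        else if c = '"' then pvSkipB rest balance 0
        else pvSkipB rest balance 1
      else
        if c = '"' then pvSkipB rest balance 1
        else if c = '(' then pvSkipB rest (balance + 1) mode
        else if c = ')' then pvSkipB rest (balance - 1) mode
        else pvSkipB rest balance mode

theorem pvSkipB_length_le (l : List Char) (b : Int) (m : Nat) :
    (pvSkipB l b m).length ≤ l.length := by
  fun_induction pvSkipB l b m <;> simp_all <;> omega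

-- port of content.find('(text_box', i): the chunk before the first match and the suffix at it
def pvFindPat (l : List Char) : Option (List Char × List Char) :=
  match l with
  | [] => none
  | c :: rest =>
    if ("(text_box".toList).isPrefixOf (c :: rest) then some ([], c :: rest)
    else match pvFindPat rest with
      | none => none
      | some (p, s) => some (c :: p, s)

-- termination helper for the outer loop of B
theorem pvFindPat_append : ∀ (l p s : List Char), pvFindPat l = some (p, s) → p ++ s = l := by
  intro l
  induction l with
  | nil => intro p s h; simp [pvFindPat] at h
  | cons c rest ih =>
    intro p s h
    simp only [pvFindPat] at h
    split at h
    · simp only [Option.some.injEq, Prod.mk.injEq] at h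
      obtain ⟨hp, hs⟩ := h
      subst hp
      subst hs
      simp
    · cases hf : pvFindPat rest with
      | none => rw [hf] at h; simp at h
      | some ps =>
        obtain ⟨p', s'⟩ := ps
        rw [hf] at h
        simp only [Option.some.injEq, Prod.mk.injEq] at h
        obtain ⟨hp, hs⟩ := h
        subst hp
        subst hs
        simpa using ih p' s' hf

-- B's outer while loop: copy whole chunks between matches, skip each matched expression
def pvLoopB (l : List Char) : List Char :=
  match h : pvFindPat l with
  | none => l
  | some (p, s) =>
    match s with
    | [] => p
    | c :: srest => p ++ pvLoopB (pvSkipB srest 1 0)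
termination_by l.length
decreasing_by
  have hl := pvFindPat_append l p (c :: srest) h
  have h1 := pvSkipB_length_le srest 1 0
  have h2 : (c :: srest).length ≤ l.length := by rw [← hl]; simp
  simp at h2
  omega

def remove_textboxes_raw_alt (content : String) : String :=
  String.ofList (pvLoopB content.toList)

-- ===== PRECONDITION & SPEC =====
def Spec_remove_textboxes_raw (content : String) (out : String) : Prop := out = remove_textboxes_raw_alt content
instance (content : String) (out : String) : Decidable (Spec_remove_textboxes_raw content out) := by unfold Spec_remove_textboxes_raw; infer_instance

-- ===== CLAIM (what is proved, stated in full; the proofs are below) =====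
def Claim_equal_remove_textboxes_raw : Prop := ∀ (content : String), Dom_remove_textboxes_raw content → Spec_remove_textboxes_raw content (remove_textboxes_raw content)

-- ===== LEMMAS AND PROOFS =====

-- A's two boolean flags encode B's mode (escape is only ever true inside a string)
theorem skipA_eq_skipB : ∀ (l : List Char) (b : Int) (s e : Bool), (e = true → s = true) →
    pvSkipA l b s e = pvSkipB l b (if e then 2 else if s then 1 else 0) := by
  intro l
  induction l with
  | nil =>
    intro b s e hse
    rw [pvSkipA, pvSkipB]
  | cons c rest ih =>
    intro b s e hse
    rw [pvSkipA, pvSkipB]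
    by_cases hb : b ≤ 0
    · simp [hb]
    · simp only [if_neg hb]
      cases e with
      | true =>
        have hs := hse rfl
        subst hs
        simpa using ih b true false (by decide)
      | false =>
        cases s with
        | true =>
          simp only [Bool.false_eq_true, if_false, if_true, show ¬(1=2) by decide]
          split_ifs <;> first
            | exact ih b true true (by decide)
            | simpa using ih b true false (by decide)
            | simpa using ih b false false (by decide)
        | false =>
          simp only [Bool.false_eq_true, if_false, show ¬(0=2) by decide, show ¬(0=1) by decide]
          split_ifs <;> first
            | simpa using ih b true false (by decide)
            | simpa using ih (b + 1) false false (by decide)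
            | simpa using ih (b - 1) false false (by decide)
            | simpa using ih b false false (by decide)

theorem loopA_no_match : ∀ (l : List Char), pvFindPat l = none → pvLoopA l = l := by
  intro l
  induction l with
  | nil => intro _; rw [pvLoopA]
  | cons c rest ih =>
    intro h
    rw [pvFindPat] at h
    split at h
    · simp at h
    · rename_i hc
      cases hf : pvFindPat rest with
      | some ps => rw [hf] at h; simp at h
      | none => rw [pvLoopA, if_neg hc, ih hf]

theorem pvFindPat_prefix : ∀ (l p s : List Char), pvFindPat l = some (p, s) →
    ("(text_box".toList).isPrefixOf s = true := by
  intro l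
  induction l with
  | nil => intro p s h; simp [pvFindPat] at h
  | cons c rest ih =>
    intro p s h
    rw [pvFindPat] at h
    split at h
    · rename_i hc
      simp only [Option.some.injEq, Prod.mk.injEq] at h
      obtain ⟨hp, hs⟩ := h
      subst hs
      exact hc
    · cases hf : pvFindPat rest with
      | none => rw [hf] at h; simp at h
      | some ps =>
        obtain ⟨p', s'⟩ := ps
        rw [hf] at h
        simp only [Option.some.injEq, Prod.mk.injEq] at h
        obtain ⟨hp, hs⟩ := h
        subst hs
        exact ih p' s' hf

theorem loopA_split : ∀ (l p s : List Char), pvFindPat l = some (p, s) →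
    pvLoopA l = p ++ pvLoopA s := by
  intro l
  induction l with
  | nil => intro p s h; simp [pvFindPat] at h
  | cons c rest ih =>
    intro p s h
    rw [pvFindPat] at h
    split at h
    · simp only [Option.some.injEq, Prod.mk.injEq] at h
      obtain ⟨hp, hs⟩ := h
      subst hp
      subst hs
      simp
    · rename_i hc
      cases hf : pvFindPat rest with
      | none => rw [hf] at h; simp at h
      | some ps =>
        obtain ⟨p', s'⟩ := ps
        rw [hf] at h
        simp only [Option.some.injEq, Prod.mk.injEq] at h
        obtain ⟨hp, hs⟩ := h
        subst hp
        subst hs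
        rw [pvLoopA, if_neg hc, ih p' s' hf]
        rfl

theorem loopA_eq_loopB : ∀ (l : List Char), pvLoopA l = pvLoopB l := by
  intro l
  induction hn : l.length using Nat.strong_induction_on generalizing l with
  | _ n ih =>
    subst hn
    rw [pvLoopB.eq_def]
    split
    · rename_i heq
      exact loopA_no_match l heq
    · rename_i p s heq
      split
      · rename_i hh heq2
        exact absurd (pvFindPat_prefix l p [] heq2) (by decide)
      · rename_i hx c srest hh
        have hpre := pvFindPat_prefix l p (c :: srest) hh
        have happ := pvFindPat_append l p (c :: srest) hh
        rw [loopA_split l p (c :: srest) hh]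
        have hA : pvLoopA (c :: srest) = pvLoopA (pvSkipA srest 1 false false) := by
          rw [pvLoopA, if_pos hpre]
        rw [hA, skipA_eq_skipB srest 1 false false (by decide)]
        simp only [Bool.false_eq_true, if_false]
        congr 1
        apply ih _ _ _ rfl
        have h1 := pvSkipB_length_le srest 1 0
        have h2 : (c :: srest).length ≤ l.length := by rw [← happ]; simp
        simp at h2
        omega

-- ===== VERDICT (by name: the statement is the Claim_ definition above) =====
theorem remove_textboxes_raw_spec : Claim_equal_remove_textboxes_raw := by
  intro content _
  unfold Spec_remove_textboxes_raw remove_textboxes_raw remove_textboxes_raw_alt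
  rw [loopA_eq_loopB]
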